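-- pv_equiv track=rewrite | github.com/compbiofan/SimSCSnTree | gen_tree_overlappingCNA.py | wg2chr
-- ===== SOURCE A (Python) =====
-- def wg2chr(chrlen, p):
--     num = 0
--     for l in range(len(chrlen)):
--         p_ = p - chrlen[l]
--         if p_ < 0:
--             return num, p
--         p = p_
--         num = num + 1
--
--     return "NA", -1
-- ===== SOURCE B (Python) =====
-- def wg2chr(chrlen, p):
--     # cumulative chromosome ends, then scan for the first end strictly above p
--     ends = []
--     t = 0
--     for l in chrlen:
--         t += l
--         ends.append(t)
--     prev = 0
--     for i, c in enumerate(ends):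
--         if p < c:
--             return i, p - prev
--         prev = c
--     return "NA", -1
-- ===== Notes on version B (the rewrite author's own statement) =====
-- stated objective: alternative
-- what changed: B precomputes the cumulative chromosome-end positions in one pass and then scans them for the first end strictly above p, returning p minus the previous end, instead of A's single loop that repeatedly mutates p by subtracting each length.
-- outside the precondition, e.g. on wg2chr([2, 3], 10): A returns ('NA', -1), B returns ('NA', -1)
import Mathlib
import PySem

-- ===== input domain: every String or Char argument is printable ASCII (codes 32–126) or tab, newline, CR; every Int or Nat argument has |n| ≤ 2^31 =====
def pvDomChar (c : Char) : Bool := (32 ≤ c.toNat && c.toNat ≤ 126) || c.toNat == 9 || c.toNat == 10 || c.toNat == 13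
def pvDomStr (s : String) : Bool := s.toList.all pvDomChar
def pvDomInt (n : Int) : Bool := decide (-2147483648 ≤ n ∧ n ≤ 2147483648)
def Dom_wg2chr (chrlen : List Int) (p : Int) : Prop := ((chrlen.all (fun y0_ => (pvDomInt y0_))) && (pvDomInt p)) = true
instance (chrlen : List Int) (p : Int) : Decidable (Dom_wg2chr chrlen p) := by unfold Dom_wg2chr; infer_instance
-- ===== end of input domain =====

-- B is an alternative decomposition (prefix sums of chromosome ends, then a scan) of the
-- same O(n) task; the return value is proved equal to A's on all inputs where A returns ints.

-- ===== PORT A =====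
-- A's loop over range(len(chrlen)) with mutable p and num, early return; the final
-- 'return "NA", -1' is not an Int pair, so that branch (excluded by Pre_) yields (-1, -1).
def wg2chrGo (chrlen : List Int) (p : Int) (num : Int) : Int × Int :=
  match chrlen with
  | [] => (-1, -1)  -- Python: return "NA", -1 (outside Pre_)
  | l :: rest =>
    let p_ := p - l
    if p_ < 0 then (num, p) else wg2chrGo rest p_ (num + 1)

def wg2chr (chrlen : List Int) (p : Int) : Int × Int :=
  wg2chrGo chrlen p 0

-- ===== PORT B =====
-- first pass of Source B: build the list of cumulative chromosome ends
def pvEnds (chrlen : List Int) (t : Int) : List Int :=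
  match chrlen with
  | [] => []
  | l :: rest => (t + l) :: pvEnds rest (t + l)

-- second pass of Source B: scan ends for the first one strictly above p
def pvScan (ends : List Int) (p : Int) (i : Int) (prev : Int) : Int × Int :=
  match ends with
  | [] => (-1, -1)  -- Python: return "NA", -1 (outside Pre_)
  | c :: rest => if p < c then (i, p - prev) else pvScan rest p (i + 1) c

def wg2chr_alt (chrlen : List Int) (p : Int) : Int × Int :=
  pvScan (pvEnds chrlen 0) p 0 0

-- ===== PRECONDITION & SPEC =====
-- Pre_ excludes exactly the inputs where Python A falls off the loop and returns ("NA", -1),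
-- a string where an int is expected (no cumulative prefix of chrlen exceeds p).
def Pre_wg2chr (chrlen : List Int) (p : Int) : Prop :=
  ∃ i ∈ List.range chrlen.length, p < ((chrlen.take (i + 1)).sum)
instance (chrlen : List Int) (p : Int) : Decidable (Pre_wg2chr chrlen p) := by
  unfold Pre_wg2chr; infer_instance

def pvWitness_wg2chr : List Int × Int := ([3, 4], 5)

def Spec_wg2chr (chrlen : List Int) (p : Int) (out : Int × Int) : Prop := out = wg2chr_alt chrlen p
instance (chrlen : List Int) (p : Int) (out : Int × Int) : Decidable (Spec_wg2chr chrlen p out) := by unfold Spec_wg2chr; infer_instance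

-- ===== CLAIM (what is proved, stated in full; the proofs are below) =====
def Claim_equal_wg2chr : Prop := ∀ (chrlen : List Int) (p : Int), Dom_wg2chr chrlen p → Pre_wg2chr chrlen p → Spec_wg2chr chrlen p (wg2chr chrlen p)

-- ===== LEMMAS AND PROOFS =====
lemma scan_eq_go (chrlen : List Int) :
    ∀ (p num t : Int), pvScan (pvEnds chrlen t) (p + t) num t = wg2chrGo chrlen p num := by
  induction chrlen with
  | nil => intro p num t; rfl
  | cons l rest ih =>
    intro p num t
    simp only [pvEnds, pvScan, wg2chrGo]
    by_cases h : p - l < 0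
    · rw [if_pos (by omega), if_pos h]
      congr 1; omega
    · rw [if_neg (by omega), if_neg h]
      have := ih (p - l) (num + 1) (t + l)
      calc pvScan (pvEnds rest (t + l)) (p + t) (num + 1) (t + l)
          = pvScan (pvEnds rest (t + l)) ((p - l) + (t + l)) (num + 1) (t + l) := by congr 1; omega
        _ = wg2chrGo rest (p - l) (num + 1) := this

-- ===== VERDICT (by name: the statement is the Claim_ definition above) =====
theorem wg2chr_spec : Claim_equal_wg2chr := by
  intro chrlen p _ _
  unfold Spec_wg2chr wg2chr wg2chr_alt
  have := scan_eq_go chrlen p 0 0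
  rw [show p + 0 = p by omega] at this
  exact this.symm
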